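-- pv_equiv track=rewrite | github.com/JUNGEEYOU/python-algorithm | 15/4.py | solution
-- ===== SOURCE A (Python) =====
-- import bisect
--
-- def count_by_range(a, left_val, right_val):
--     """
--     범위에 존재하는 데이터 개수
--     """
--     right_val = bisect.bisect_right(a, right_val)
--     left_val = bisect.bisect_left(a, left_val)
--     return right_val - left_val
--
-- def solution(words, queries):
--     answer = []
--     arr = [[] for _ in range(10001)]
--     reversed_arr = [[] for _ in range(10001)]
--     for word in words:
--         arr[len(word)].append(word)
--         reversed_arr[len(word)].append(word[::-1])
--     # 단어를 정렬
--     for i in range(10001):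
--         arr[i].sort()
--         reversed_arr[i].sort()
--
--     for querie in queries:
--         if querie[0] == "?":    # 앞에 ?인 경우, ????o
--             res = count_by_range(reversed_arr[len(querie)], querie[::-1].replace('?', 'a'), querie[::-1].replace('?', 'z'))
--         else:                  # 뒤가 ?인 경우, fro??
--             res = count_by_range(arr[len(querie)], querie.replace("?", "a"), querie.replace("?","z"))
--         answer.append(res)
--     return answer
-- ===== SOURCE B (Python) =====
-- def solution(words, queries):
--     # Direct counting: a word matches a query exactly when it has the same
--     # length and (in the orientation chosen by where the '?' block is) lies
--     # in the closed range [query with '?'->'a', query with '?'->'z'].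
--     answer = []
--     for q in queries:
--         if q[0] == "?":
--             key = q[::-1]
--             lo, hi = key.replace("?", "a"), key.replace("?", "z")
--             answer.append(sum(1 for w in words if len(w) == len(q) and lo <= w[::-1] <= hi))
--         else:
--             lo, hi = q.replace("?", "a"), q.replace("?", "z")
--             answer.append(sum(1 for w in words if len(w) == len(q) and lo <= w <= hi))
--     return answer
-- ===== Notes on version B (the rewrite author's own statement) =====
-- stated objective: simpler
-- what changed: Replaces the 2x10001 preallocated length buckets, per-bucket sorting and bisect binary searches by a direct per-query linear count of the words whose length matches and which fall in the closed range [query with '?'->'a', query with '?'->'z'] (reversed for leading-'?' queries); Pre_ only excludes inputs where A raises (an empty query string, or a word/query longer than 10000 characters, both IndexError).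
import Mathlib
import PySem

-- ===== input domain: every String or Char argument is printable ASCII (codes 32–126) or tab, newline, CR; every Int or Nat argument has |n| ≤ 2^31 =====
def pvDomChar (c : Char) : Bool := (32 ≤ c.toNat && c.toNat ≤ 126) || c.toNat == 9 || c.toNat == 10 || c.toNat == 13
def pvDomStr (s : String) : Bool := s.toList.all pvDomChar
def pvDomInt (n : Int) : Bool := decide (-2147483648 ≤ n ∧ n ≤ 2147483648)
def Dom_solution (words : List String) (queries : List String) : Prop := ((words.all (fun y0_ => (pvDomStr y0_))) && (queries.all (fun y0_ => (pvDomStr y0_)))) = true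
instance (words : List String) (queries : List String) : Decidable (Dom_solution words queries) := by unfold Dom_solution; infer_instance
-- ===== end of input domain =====

-- B answers each query by a direct linear count over the words instead of A's
-- 2×10001 length buckets + per-bucket sort + bisect; return values agree on Pre_
-- (A raises IndexError on an empty query and on words/queries longer than 10000).

-- shared helper: port of the slicing primitive s[::-1] (step ≠ 0, so slice? never returns none)
def pyRevStr (s : String) : String := (PySem.Str.slice? s none none (-1)).getD s

-- ===== PORT A =====
-- count_by_range(a, left_val, right_val) = bisect_right(a, right_val) - bisect_left(a, left_val)
def countByRange (a : List String) (leftVal rightVal : String) : Int :=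
  (PySem.List.bisectRight a rightVal : Int) - (PySem.List.bisectLeft a leftVal : Int)

def solution (words : List String) (queries : List String) : List Int :=
  -- arr = [[] for _ in range(10001)]; reversed_arr likewise
  let arr0 : List (List String) := (PySem.List.pyRange 0 10001).map (fun _ => ([] : List String))
  -- for word in words: arr[len(word)].append(word); reversed_arr[len(word)].append(word[::-1])
  -- (indices are in range under Pre_; pySetD/pyGetD are the total forms)
  let p := words.foldl (fun (p : List (List String) × List (List String)) w =>
      (PySem.List.pySetD p.1 (PySem.Str.len w) (PySem.List.pyGetD p.1 (PySem.Str.len w) [] ++ [w]),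
       PySem.List.pySetD p.2 (PySem.Str.len w) (PySem.List.pyGetD p.2 (PySem.Str.len w) [] ++ [pyRevStr w])))
      (arr0, arr0)
  -- for i in range(10001): arr[i].sort(); reversed_arr[i].sort()
  let p2 := (PySem.List.pyRange 0 10001).foldl (fun (a : List (List String) × List (List String)) i =>
      (PySem.List.pySetD a.1 i (PySem.List.sorted (PySem.List.pyGetD a.1 i []) (fun w => w)),
       PySem.List.pySetD a.2 i (PySem.List.sorted (PySem.List.pyGetD a.2 i []) (fun w => w)))) p
  -- for querie in queries: … answer.append(res)
  queries.foldl (fun answer q =>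
    let res : Int :=
      if PySem.Str.pyGet? q 0 = some '?' then
        countByRange (PySem.List.pyGetD p2.2 (PySem.Str.len q) [])
          (PySem.Str.replace (pyRevStr q) "?" "a") (PySem.Str.replace (pyRevStr q) "?" "z")
      else
        countByRange (PySem.List.pyGetD p2.1 (PySem.Str.len q) [])
          (PySem.Str.replace q "?" "a") (PySem.Str.replace q "?" "z")
    answer ++ [res]) []

-- ===== PORT B =====
def solution_alt (words : List String) (queries : List String) : List Int :=
  queries.map (fun q =>
    if PySem.Str.pyGet? q 0 = some '?' then
      let key := pyRevStr q
      let lo := PySem.Str.replace key "?" "a"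
      let hi := PySem.Str.replace key "?" "z"
      -- sum(1 for w in words if len(w) == len(q) and lo <= w[::-1] <= hi)
      ((words.countP (fun w => PySem.Str.len w == PySem.Str.len q
          && decide (lo ≤ pyRevStr w) && decide (pyRevStr w ≤ hi)) : Nat) : Int)
    else
      let lo := PySem.Str.replace q "?" "a"
      let hi := PySem.Str.replace q "?" "z"
      ((words.countP (fun w => PySem.Str.len w == PySem.Str.len q
          && decide (lo ≤ w) && decide (w ≤ hi)) : Nat) : Int))

-- ===== PRECONDITION & SPEC =====
-- Pre_ excludes exactly the inputs where A raises IndexError: an empty query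
-- (querie[0]) or a word/query longer than 10000 (index into the 10001 buckets).
def Pre_solution (words : List String) (queries : List String) : Prop :=
  (∀ w ∈ words, w.toList.length ≤ 10000) ∧
  (∀ q ∈ queries, q.toList.length ≠ 0 ∧ q.toList.length ≤ 10000)
instance (words : List String) (queries : List String) : Decidable (Pre_solution words queries) := by
  unfold Pre_solution; infer_instance

def pvWitness_solution : List String × List String := (["ab", "fx", ""], ["a?", "??", "?b", "x"])

def Spec_solution (words : List String) (queries : List String) (out : List Int) : Prop := out = solution_alt words queries
instance (words : List String) (queries : List String) (out : List Int) : Decidable (Spec_solution words queries out) := by unfold Spec_solution; infer_instance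

-- ===== CLAIM (what is proved, stated in full; the proofs are below) =====
def Claim_equal_solution : Prop := ∀ (words : List String) (queries : List String), Dom_solution words queries → Pre_solution words queries → Spec_solution words queries (solution words queries)

-- ===== LEMMAS AND PROOFS =====

-- single-character replace is a character map
theorem replace_go_single (p a : Char) : ∀ (fuel : Nat) (l acc : List Char), l.length ≤ fuel →
    PySem.Chars.replace.go [p] [a] fuel l acc = acc.reverse ++ l.map (fun c => if c = p then a else c) := by
  intro fuel
  induction fuel with
  | zero => intro l acc h; rw [PySem.Chars.replace.go.eq_def]; cases l with
    | nil => simp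
    | cons c t => simp at h
  | succ n ih =>
    intro l acc h
    rw [PySem.Chars.replace.go.eq_def]
    cases l with
    | nil => simp
    | cons c t =>
      simp only [List.map_cons]
      by_cases hc : c = p
      · have hpre : List.isPrefixOf [p] (c :: t) = true := by simp [List.isPrefixOf, hc]
        simp only [hpre]
        rw [ih _ _ (by simpa using Nat.le_of_succ_le_succ h)]
        simp [hc]
      · have hpre : List.isPrefixOf [p] (c :: t) = false := by
          simp [List.isPrefixOf]; exact fun hh => (hc hh.symm).elim
        simp only [hpre, Bool.false_eq_true, if_false]
        rw [ih _ _ (by simpa using Nat.le_of_succ_le_succ h)]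
        simp [hc]

theorem replace_single (s : List Char) (p a : Char) :
    PySem.Chars.replace s [p] [a] = s.map (fun c => if c = p then a else c) := by
  rw [PySem.Chars.replace]
  simp only [List.isEmpty_cons, Bool.false_eq_true, if_false]
  rw [replace_go_single p a s.length s [] le_rfl]; simp

theorem map_le_map_pointwise (f g : Char → Char) (h : ∀ c, f c ≤ g c) :
    ∀ cs : List Char, cs.map f ≤ cs.map g := by
  intro cs
  induction cs with
  | nil => simp
  | cons c t ih =>
    simp only [List.map_cons]
    rcases lt_or_eq_of_le (h c) with hlt | heq
    · exact le_of_lt (List.Lex.rel hlt)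
    · rw [heq]; exact List.cons_le_cons _ ih

-- lo = s.replace('?','a') ≤ s.replace('?','z') = hi
theorem replace_a_le_replace_z (s : String) :
    PySem.Str.replace s "?" "a" ≤ PySem.Str.replace s "?" "z" := by
  rw [String.le_iff_toList_le, PySem.Str.toList_replace, PySem.Str.toList_replace]
  have h1 : ("?" : String).toList = ['?'] := by decide
  have h2 : ("a" : String).toList = ['a'] := by decide
  have h3 : ("z" : String).toList = ['z'] := by decide
  rw [h1, h2, h3, replace_single, replace_single]
  exact map_le_map_pointwise _ _ (fun c => by by_cases hc : c = '?' <;> simp [hc] <;> decide) _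

-- in a nondecreasing list, a downward-closed predicate holds exactly on the first countP positions
theorem sorted_countP_iff (p : String → Bool) (hp : ∀ y z : String, y ≤ z → p z = true → p y = true) :
    ∀ (xs : List String), xs.Pairwise (· ≤ ·) →
      ∀ j (hj : j < xs.length), (p xs[j] = true ↔ j < xs.countP p) := by
  intro xs
  induction xs with
  | nil => intro _ j hj; simp at hj
  | cons a t ih =>
    intro hs j hj
    rcases List.pairwise_cons.mp hs with ⟨ha, ht⟩
    by_cases hpa : p a = true
    · cases j with
      | zero => simp [hpa]
      | succ j =>
        have hj' : j < t.length := by simpa using hj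
        have h2 := ih ht j hj'
        simp only [List.getElem_cons_succ, List.countP_cons, hpa, if_true]
        exact h2.trans (by omega)
    · have hzero : t.countP p = 0 := List.countP_eq_zero.mpr (fun y hy => by
        intro hpy; exact hpa (hp a y (ha y hy) hpy))
      cases j with
      | zero => simp [hpa, hzero]
      | succ j =>
        have hj' : j < t.length := by simpa using hj
        have hne : ¬ p t[j] = true := fun hpy => hpa (hp a t[j] (ha _ (List.getElem_mem hj')) hpy)
        simp [hpa, hzero, hne]

theorem bisectRightLoop_count (xs : List String) (x : String) (hs : xs.Pairwise (· ≤ ·)) :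
    ∀ (fuel lo hi : Nat), lo ≤ xs.countP (· ≤ x) → xs.countP (· ≤ x) ≤ hi → hi ≤ xs.length →
      hi - lo ≤ fuel → PySem.List.bisectRightLoop xs x fuel lo hi = xs.countP (· ≤ x) := by
  intro fuel
  induction fuel with
  | zero =>
    intro lo hi h1 h2 h3 h4
    rw [PySem.List.bisectRightLoop.eq_def]; simp only []; omega
  | succ n ih =>
    intro lo hi h1 h2 h3 h4
    rw [PySem.List.bisectRightLoop.eq_def]
    by_cases hlh : lo < hi
    · simp only [hlh, if_true]
      have hmid : (lo + hi) / 2 < xs.length := by omega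
      rw [List.getElem?_eq_getElem hmid]
      by_cases hx : x < xs[(lo + hi) / 2]
      · simp only [hx, if_true]
        have : ¬ ((lo + hi) / 2 < xs.countP (· ≤ x)) := by
          rw [← sorted_countP_iff (· ≤ x) (fun y z hyz hz => by
              simp only [decide_eq_true_eq] at *; exact le_trans hyz hz) xs hs _ hmid]
          simp [not_le.mpr hx]
        exact ih lo ((lo + hi) / 2) h1 (by omega) (by omega) (by omega)
      · simp only [hx, if_false]
        have : (lo + hi) / 2 < xs.countP (· ≤ x) := by
          rw [← sorted_countP_iff (· ≤ x) (fun y z hyz hz => by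
              simp only [decide_eq_true_eq] at *; exact le_trans hyz hz) xs hs _ hmid]
          simp [not_lt.mp hx]
        exact ih ((lo + hi) / 2 + 1) hi (by omega) h2 h3 (by omega)
    · simp only [hlh, if_false]; omega

theorem bisectRight_count (xs : List String) (x : String) (hs : xs.Pairwise (· ≤ ·)) :
    PySem.List.bisectRight xs x = xs.countP (· ≤ x) :=
  bisectRightLoop_count xs x hs xs.length 0 xs.length (Nat.zero_le _) List.countP_le_length le_rfl (by omega)

theorem bisectLeftLoop_count (xs : List String) (x : String) (hs : xs.Pairwise (· ≤ ·)) :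
    ∀ (fuel lo hi : Nat), lo ≤ xs.countP (· < x) → xs.countP (· < x) ≤ hi → hi ≤ xs.length →
      hi - lo ≤ fuel → PySem.List.bisectLeftLoop xs x fuel lo hi = xs.countP (· < x) := by
  intro fuel
  induction fuel with
  | zero =>
    intro lo hi h1 h2 h3 h4
    rw [PySem.List.bisectLeftLoop.eq_def]; simp only []; omega
  | succ n ih =>
    intro lo hi h1 h2 h3 h4
    rw [PySem.List.bisectLeftLoop.eq_def]
    by_cases hlh : lo < hi
    · simp only [hlh, if_true]
      have hmid : (lo + hi) / 2 < xs.length := by omega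
      rw [List.getElem?_eq_getElem hmid]
      by_cases hx : xs[(lo + hi) / 2] < x
      · simp only [hx, if_true]
        have : (lo + hi) / 2 < xs.countP (· < x) := by
          rw [← sorted_countP_iff (· < x) (fun y z hyz hz => by
              simp only [decide_eq_true_eq] at *; exact lt_of_le_of_lt hyz hz) xs hs _ hmid]
          simp [hx]
        exact ih ((lo + hi) / 2 + 1) hi (by omega) h2 h3 (by omega)
      · simp only [hx, if_false]
        have : ¬ ((lo + hi) / 2 < xs.countP (· < x)) := by
          rw [← sorted_countP_iff (· < x) (fun y z hyz hz => by
              simp only [decide_eq_true_eq] at *; exact lt_of_le_of_lt hyz hz) xs hs _ hmid]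
          simp [hx]
        exact ih lo ((lo + hi) / 2) h1 (by omega) (by omega) (by omega)
    · simp only [hlh, if_false]; omega

theorem bisectLeft_count (xs : List String) (x : String) (hs : xs.Pairwise (· ≤ ·)) :
    PySem.List.bisectLeft xs x = xs.countP (· < x) :=
  bisectLeftLoop_count xs x hs xs.length 0 xs.length (Nat.zero_le _) List.countP_le_length le_rfl (by omega)

theorem countP_range_split (xs : List String) (lo hi : String) (h : lo ≤ hi) :
    xs.countP (· ≤ hi) = xs.countP (· < lo) + xs.countP (fun y => lo ≤ y && y ≤ hi) := by
  induction xs with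
  | nil => simp
  | cons a t ih =>
    simp only [List.countP_cons, ih]
    rcases lt_or_ge a lo with hl | hl
    · have h2 : a ≤ hi := le_of_lt (lt_of_lt_of_le hl h)
      simp [hl, h2, not_le.mpr hl]
      omega
    · by_cases hh : a ≤ hi <;> simp [not_lt.mpr hl, hl, hh] <;> omega

-- count_by_range over a sorted bucket is the closed-range count over the bucket
theorem countByRange_sorted (xs : List String) (lo hi : String) (h : lo ≤ hi) :
    countByRange (PySem.List.sorted xs (fun w => w)) lo hi
      = (xs.countP (fun y => lo ≤ y && y ≤ hi) : Int) := by
  have hp : (PySem.List.sorted xs (fun w => w)).Pairwise (· ≤ ·) :=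
    PySem.List.sorted_pairwise xs (fun w => w)
  have hperm := PySem.List.sorted_perm xs (fun w => w) false
  unfold countByRange
  rw [bisectRight_count _ _ hp, bisectLeft_count _ _ hp,
      hperm.countP_eq, hperm.countP_eq, countP_range_split xs lo hi h]
  push_cast
  ring

-- buckets built by the word loop: bucket n is the in-order list of (f w) over words of length n
theorem bucket_fold (f : String → String) :
    ∀ (ws : List String) (a : List (List String)) (n : Nat),
      (∀ w ∈ ws, w.toList.length < a.length) → n < a.length →
      (ws.foldl (fun a w => a.set w.toList.length (a.getD w.toList.length [] ++ [f w])) a).getD n []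
        = a.getD n [] ++ (ws.filter (fun w => w.toList.length == n)).map f := by
  intro ws
  induction ws with
  | nil => intro a n _ _; simp
  | cons w t ih =>
    intro a n hws hn
    simp only [List.foldl_cons, List.filter_cons]
    have hw : w.toList.length < a.length := hws w (List.mem_cons_self)
    rw [ih _ n (fun v hv => by rw [List.length_set]; exact hws v (List.mem_cons_of_mem _ hv))
        (by rwa [List.length_set])]
    by_cases hwn : w.toList.length = n
    · subst hwn
      rw [List.getD_eq_getElem?_getD, List.getElem?_set_self (by omega),
          Option.getD_some]
      simp
    · rw [List.getD_eq_getElem?_getD, List.getElem?_set_ne (by omega), ← List.getD_eq_getElem?_getD]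
      have hwn' : ¬ w.length = n := by simpa using hwn
      simp [hwn']

-- the sorting loop sorts every bucket below n and leaves the rest
theorem sort_fold :
    ∀ (n : Nat) (a : List (List String)),
      (let F := (List.range n).foldl (fun a k =>
          a.set k (PySem.List.sorted (a.getD k []) (fun w => w))) a
       F.length = a.length ∧
       (∀ m, m < n → m < a.length → F.getD m [] = PySem.List.sorted (a.getD m []) (fun w => w)) ∧
       (∀ m, n ≤ m → F.getD m [] = a.getD m [])) := by
  intro n
  induction n with
  | zero => intro a; exact ⟨rfl, fun m hm _ => by omega, fun m _ => rfl⟩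
  | succ n ih =>
    intro a
    obtain ⟨hlen, hlt, hge⟩ := ih a
    simp only [List.range_succ, List.foldl_append, List.foldl_cons, List.foldl_nil]
    refine ⟨by rw [List.length_set, hlen], ?_, ?_⟩
    · intro m hm hma
      by_cases hmn : m = n
      · subst hmn
        rw [List.getD_eq_getElem?_getD, List.getElem?_set_self (by omega), Option.getD_some,
            hge m le_rfl]
      · rw [List.getD_eq_getElem?_getD, List.getElem?_set_ne (by omega),
            ← List.getD_eq_getElem?_getD]
        exact hlt m (by omega) hma
    · intro m hm
      rw [List.getD_eq_getElem?_getD, List.getElem?_set_ne (by omega),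
          ← List.getD_eq_getElem?_getD]
      exact hge m (by omega)

theorem getD_map_const_nil (l : List Int) (n : Nat) :
    (l.map (fun _ => ([] : List String))).getD n [] = [] := by
  rcases Nat.lt_or_ge n l.length with h | h
  · rw [List.getD_eq_getElem?_getD, List.getElem?_map, List.getElem?_eq_getElem h]
    simp
  · rw [List.getD_eq_getElem?_getD, List.getElem?_eq_none (by simpa using h)]
    simp

theorem word_fold_length (f : String → String) : ∀ (ws : List String) (a : List (List String)),
    (ws.foldl (fun a w => a.set w.toList.length (a.getD w.toList.length [] ++ [f w])) a).length
      = a.length := by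
  intro ws
  induction ws with
  | nil => intro a; rfl
  | cons w t ih => intro a; simp only [List.foldl_cons]; rw [ih, List.length_set]

-- one query branch of A equals the corresponding direct count
theorem branch_eq (f : String → String) (words : List String)
    (hw : ∀ w ∈ words, w.toList.length ≤ 10000) (s : String) (n : Nat) (hn : n ≤ 10000)
    (a0 : List (List String)) (hlen0 : a0.length = 10001) (h0 : a0.getD n [] = []) :
    countByRange
      (((List.range 10001).foldl (fun a k => a.set k (PySem.List.sorted (a.getD k []) (fun w => w)))
        (words.foldl (fun a w => a.set w.toList.length (a.getD w.toList.length [] ++ [f w])) a0)).getD n [])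
      (PySem.Str.replace s "?" "a") (PySem.Str.replace s "?" "z")
    = ((words.countP (fun w =>
        (decide (PySem.Str.replace s "?" "a" ≤ f w) && decide (f w ≤ PySem.Str.replace s "?" "z"))
          && (w.toList.length == n)) : Nat) : Int) := by
  have hW := bucket_fold f words a0 n
    (fun w hw' => by rw [hlen0]; exact Nat.lt_succ_of_le (hw w hw')) (by omega)
  have hWlen := word_fold_length f words a0
  obtain ⟨hFlen, hFlt, _⟩ := sort_fold 10001
    (words.foldl (fun a w => a.set w.toList.length (a.getD w.toList.length [] ++ [f w])) a0)
  rw [hFlt n (by omega) (by rw [hWlen, hlen0]; omega), hW, h0, List.nil_append,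
      countByRange_sorted _ _ _ (replace_a_le_replace_z s),
      List.countP_map, List.countP_filter]
  rfl

-- ===== VERDICT (by name: the statement is the Claim_ definition above) =====
theorem solution_spec : Claim_equal_solution := by
  intro words queries _ hpre
  obtain ⟨hw, hq⟩ := hpre
  show solution words queries = solution_alt words queries
  simp only [solution, solution_alt]
  rw [PySem.List.foldl_prod_mk
      (fun p1 w => PySem.List.pySetD p1 (PySem.Str.len w) (PySem.List.pyGetD p1 (PySem.Str.len w) [] ++ [w]))
      (fun p2 w => PySem.List.pySetD p2 (PySem.Str.len w) (PySem.List.pyGetD p2 (PySem.Str.len w) [] ++ [pyRevStr w])),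
     PySem.List.foldl_prod_mk
      (fun x i => PySem.List.pySetD x i (PySem.List.sorted (PySem.List.pyGetD x i []) (fun w => w)))
      (fun x i => PySem.List.pySetD x i (PySem.List.sorted (PySem.List.pyGetD x i []) (fun w => w))),
     show (10001 : Int) = ((10001 : Nat) : Int) from by norm_num,
     PySem.List.pyRange_zero_natCast]
  simp only [List.foldl_map, PySem.Str.len_eq, PySem.List.pySetD_natCast,
    PySem.List.pyGetD_natCast]
  rw [PySem.List.foldl_append_singleton_eq_map, List.nil_append]
  apply List.map_congr_left
  intro q hqmem
  obtain ⟨hq0, hqlen⟩ := hq q hqmem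
  have ha0 : (List.map (fun _ => ([] : List String))
      ((List.range 10001).map (Nat.cast : Nat → Int))).length = 10001 := by
    rw [List.length_map, List.length_map, List.length_range]
  have ha0g : (List.map (fun _ => ([] : List String))
      ((List.range 10001).map (Nat.cast : Nat → Int))).getD q.toList.length [] = [] :=
    getD_map_const_nil _ _
  by_cases h1 : PySem.Str.pyGet? q 0 = some '?'
  · rw [if_pos h1, if_pos h1,
        branch_eq pyRevStr words hw (pyRevStr q) q.toList.length hqlen _ ha0 ha0g]
    refine congrArg (Nat.cast : Nat → Int) (List.countP_congr ?_)
    intro w _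
    by_cases hl : w.toList.length = q.toList.length
    · simp [hl, Bool.and_comm]
    · have hl2 : (w.toList.length : Int) ≠ (q.toList.length : Int) := by exact_mod_cast hl
      have hl3 : ¬ w.length = q.length := by simpa using hl
      simp [hl3]
  · rw [if_neg h1, if_neg h1,
        branch_eq (fun w => w) words hw q q.toList.length hqlen _ ha0 ha0g]
    refine congrArg (Nat.cast : Nat → Int) (List.countP_congr ?_)
    intro w _
    by_cases hl : w.toList.length = q.toList.length
    · simp [hl, Bool.and_comm]
    · have hl2 : (w.toList.length : Int) ≠ (q.toList.length : Int) := by exact_mod_cast hl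
      have hl3 : ¬ w.length = q.length := by simpa using hl
      simp [hl3]
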